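-- pv_equiv track=rewrite | github.com/Shubhm8971/WhisperCart | flask_backend/app.py | closest_indices_within_threshold
-- ===== SOURCE A (Python) =====
-- def closest_indices_within_threshold(pos, positions, threshold):
--     """Return all indices whose distance equals the minimal distance and is within threshold."""
--     if not positions:
--         return []
--     dists = [abs(pos - p) for p in positions]
--     min_d = min(dists)
--     if min_d > threshold:
--         return []
--     return [i for i, d in enumerate(dists) if d == min_d]
-- ===== SOURCE B (Python) =====
-- def closest_indices_within_threshold(pos, positions, threshold):
--     """Single pass: track the best distance so far and the indices achieving it."""
--     best_d = None
--     idxs = []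
--     for i, p in enumerate(positions):
--         d = abs(pos - p)
--         if best_d is None or d < best_d:
--             best_d = d
--             idxs = [i]
--         elif d == best_d:
--             idxs.append(i)
--     if best_d is None or best_d > threshold:
--         return []
--     return idxs
-- ===== Notes on version B (the rewrite author's own statement) =====
-- stated objective: alternative
-- what changed: Replaces A's three passes (build a distance list, take min, filter by it) with one enumerate loop that maintains the running best distance and the index list, allocating no distance list.
import Mathlib
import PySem

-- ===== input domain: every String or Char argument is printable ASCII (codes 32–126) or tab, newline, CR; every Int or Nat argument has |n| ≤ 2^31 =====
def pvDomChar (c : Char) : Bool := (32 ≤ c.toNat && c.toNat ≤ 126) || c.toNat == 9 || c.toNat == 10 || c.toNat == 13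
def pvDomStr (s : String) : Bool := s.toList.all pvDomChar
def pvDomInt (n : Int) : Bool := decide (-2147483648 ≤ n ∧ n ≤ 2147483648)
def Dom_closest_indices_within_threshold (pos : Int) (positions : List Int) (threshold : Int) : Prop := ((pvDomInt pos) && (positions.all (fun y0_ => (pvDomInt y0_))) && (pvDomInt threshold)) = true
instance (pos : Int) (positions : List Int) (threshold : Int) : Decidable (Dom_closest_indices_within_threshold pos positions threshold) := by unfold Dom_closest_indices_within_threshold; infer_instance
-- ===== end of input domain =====

-- B replaces A's three passes (distance list, min, filter) by one enumerate loop keeping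
-- the running best distance and its index list; same cost class, no auxiliary list.

-- ===== PORT A =====
def closest_indices_within_threshold (pos : Int) (positions : List Int) (threshold : Int) : List Int :=
  if positions = [] then []
  else
    let dists := positions.map (fun p => |pos - p|)
    match PySem.List.min? dists (fun x => x) with
    | none => []
    | some min_d =>
      if min_d > threshold then []
      else ((PySem.List.enumerate dists 0).filter (fun id => id.2 == min_d)).map (·.1)

-- ===== PORT B =====
-- loop body of Source B's for-loop: state = (best_d : Option Int, idxs)
def pvBStep (pos : Int) (st : Option Int × List Int) (ip : Int × Int) : Option Int × List Int :=
  let d := |pos - ip.2|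
  match st.1 with
  | none => (some d, [ip.1])
  | some b =>
    if d < b then (some d, [ip.1])
    else if d = b then (some b, st.2 ++ [ip.1])
    else (some b, st.2)

def closest_indices_within_threshold_alt (pos : Int) (positions : List Int) (threshold : Int) : List Int :=
  let st := (PySem.List.enumerate positions 0).foldl (pvBStep pos) (none, [])
  match st.1 with
  | none => []
  | some b => if b > threshold then [] else st.2

-- ===== PRECONDITION & SPEC =====
def Spec_closest_indices_within_threshold (pos : Int) (positions : List Int) (threshold : Int) (out : List Int) : Prop := out = closest_indices_within_threshold_alt pos positions threshold
instance (pos : Int) (positions : List Int) (threshold : Int) (out : List Int) : Decidable (Spec_closest_indices_within_threshold pos positions threshold out) := by unfold Spec_closest_indices_within_threshold; infer_instance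

-- ===== CLAIM (what is proved, stated in full; the proofs are below) =====
def Claim_equal_closest_indices_within_threshold : Prop := ∀ (pos : Int) (positions : List Int) (threshold : Int), Dom_closest_indices_within_threshold pos positions threshold → Spec_closest_indices_within_threshold pos positions threshold (closest_indices_within_threshold pos positions threshold)

-- ===== LEMMAS AND PROOFS =====

-- running minimum of distances of t, started at b
def pvMinF (pos : Int) (b : Int) (t : List Int) : Int := t.foldl (fun m p => min m |pos - p|) b

lemma pvMinF_le (pos b : Int) (t : List Int) : pvMinF pos b t ≤ b := by
  induction t generalizing b with
  | nil => simp [pvMinF]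
  | cons p t ih =>
    have := ih (min b |pos - p|)
    simp only [pvMinF, List.foldl_cons] at *
    exact le_trans this (min_le_left _ _)

lemma pvMinF_le_mem (pos b : Int) (t : List Int) (q : Int) (hq : q ∈ t) :
    pvMinF pos b t ≤ |pos - q| := by
  induction t generalizing b with
  | nil => simp at hq
  | cons p t ih =>
    rcases List.mem_cons.mp hq with h | h
    · subst h
      have := pvMinF_le pos (min b |pos - q|) t
      simp only [pvMinF, List.foldl_cons]
      exact le_trans this (min_le_right _ _)
    · exact ih (min b |pos - p|) h

lemma pvMinF_eq_of_all_ge (pos b : Int) (t : List Int)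
    (h : ∀ q ∈ t, b ≤ |pos - q|) : pvMinF pos b t = b := by
  induction t generalizing b with
  | nil => simp [pvMinF]
  | cons p t ih =>
    simp only [pvMinF, List.foldl_cons]
    have hb : min b |pos - p| = b := min_eq_left (h p (List.mem_cons_self ..))
    rw [hb]
    exact ih b (fun q hq => h q (List.mem_cons_of_mem _ hq))

lemma pvMinF_lt_of_mem_lt (pos b : Int) (t : List Int) (q : Int) (hq : q ∈ t)
    (h : |pos - q| < b) : pvMinF pos b t < b :=
  lt_of_le_of_lt (pvMinF_le_mem pos b t q hq) h

-- the loop invariant: folding Source B's body over an enumerated suffix from state (some b, acc)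
lemma pvB_inv (pos : Int) (t : List Int) : ∀ (s b : Int) (acc : List Int),
    (PySem.List.enumerate t s).foldl (pvBStep pos) (some b, acc) =
      (some (pvMinF pos b t),
       (if ∃ q ∈ t, |pos - q| < b then [] else acc) ++
         ((PySem.List.enumerate t s).filter (fun ip => |pos - ip.2| == pvMinF pos b t)).map (·.1)) := by
  induction t with
  | nil => intro s b acc; simp [PySem.List.enumerate, pvMinF]
  | cons p t ih =>
    intro s b acc
    rw [PySem.List.enumerate_cons]
    set d := |pos - p| with hd
    have hstep : pvBStep pos (some b, acc) (s, p) =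
        if d < b then (some d, [s]) else if d = b then (some b, acc ++ [s]) else (some b, acc) := by
      simp [pvBStep, hd]
    have hmin : pvMinF pos b (p :: t) = pvMinF pos (min b d) t := by
      simp only [pvMinF, List.foldl_cons, hd]
    by_cases h1 : d < b
    · -- strict improvement: reset to [s]
      rw [List.foldl_cons, hstep, if_pos h1, ih (s+1) d [s]]
      have hmd : min b d = d := min_eq_right (le_of_lt h1)
      rw [hmin, hmd]
      have hex : (∃ q ∈ p :: t, |pos - q| < b) := ⟨p, List.mem_cons_self .., h1⟩
      rw [if_pos hex]
      by_cases h2 : ∃ q ∈ t, |pos - q| < d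
      · rw [if_pos h2]
        obtain ⟨q, hq, hlt⟩ := h2
        have hne : ¬ (d = pvMinF pos d t) := by
          have := pvMinF_lt_of_mem_lt pos d t q hq hlt
          omega
        simp only [List.filter_cons]
        have : (|pos - p| == pvMinF pos d t) = false := by
          simp only [beq_eq_false_iff_ne, ne_eq, ← hd]
          exact hne
        rw [this]
        simp
      · rw [if_neg h2]
        have heq : pvMinF pos d t = d := by
          apply pvMinF_eq_of_all_ge
          intro q hq
          by_contra hc
          exact h2 ⟨q, hq, by omega⟩
        simp only [List.filter_cons, heq]
        have : (|pos - p| == d) = true := by simp [hd]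
        rw [this]
        simp
    · by_cases h2 : d = b
      · -- tie: append s
        rw [List.foldl_cons, hstep, if_neg h1, if_pos h2, ih (s+1) b (acc ++ [s])]
        have hmd : min b d = b := min_eq_left (le_of_eq h2.symm)
        rw [hmin, hmd]
        have hexiff : (∃ q ∈ p :: t, |pos - q| < b) ↔ (∃ q ∈ t, |pos - q| < b) := by
          constructor
          · rintro ⟨q, hq, hlt⟩
            rcases List.mem_cons.mp hq with h | h
            · exfalso; rw [h, ← hd, h2] at hlt; omega
            · exact ⟨q, h, hlt⟩
          · rintro ⟨q, hq, hlt⟩; exact ⟨q, List.mem_cons_of_mem _ hq, hlt⟩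
        by_cases h3 : ∃ q ∈ t, |pos - q| < b
        · rw [if_pos h3, if_pos (hexiff.mpr h3)]
          obtain ⟨q, hq, hlt⟩ := h3
          have hne : (|pos - p| == pvMinF pos b t) = false := by
            have := pvMinF_lt_of_mem_lt pos b t q hq hlt
            simp only [beq_eq_false_iff_ne, ne_eq, ← hd]
            omega
          simp only [List.filter_cons, hne, Bool.false_eq_true, if_false]
        · rw [if_neg h3, if_neg (fun h => h3 (hexiff.mp h))]
          have heq : pvMinF pos b t = b := by
            apply pvMinF_eq_of_all_ge
            intro q hq
            by_contra hc
            exact h3 ⟨q, hq, by omega⟩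
          have hpe : (|pos - p| == pvMinF pos b t) = true := by
            rw [← hd, h2, heq]; exact beq_self_eq_true b
          simp only [List.filter_cons, hpe, if_true, List.map_cons]
          simp
      · -- worse: skip
        rw [List.foldl_cons, hstep, if_neg h1, if_neg h2, ih (s+1) b acc]
        have hmd : min b d = b := min_eq_left (by omega)
        rw [hmin, hmd]
        have hexiff : (∃ q ∈ p :: t, |pos - q| < b) ↔ (∃ q ∈ t, |pos - q| < b) := by
          constructor
          · rintro ⟨q, hq, hlt⟩
            rcases List.mem_cons.mp hq with h | h
            · exfalso; rw [h, ← hd] at hlt; omega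
            · exact ⟨q, h, hlt⟩
          · rintro ⟨q, hq, hlt⟩; exact ⟨q, List.mem_cons_of_mem _ hq, hlt⟩
        have hne : (|pos - p| == pvMinF pos b t) = false := by
          simp only [beq_eq_false_iff_ne, ne_eq, ← hd]
          have := pvMinF_le pos b t
          omega
        simp only [List.filter_cons, hne, Bool.false_eq_true, if_false]
        by_cases h3 : ∃ q ∈ t, |pos - q| < b
        · rw [if_pos h3, if_pos (hexiff.mpr h3)]
        · rw [if_neg h3, if_neg (fun h => h3 (hexiff.mp h))]

-- filtering the enumerated distance list = filtering the enumerated positions through the distance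
lemma pvEnumMapFilter (pos m : Int) (l : List Int) : ∀ s : Int,
    ((PySem.List.enumerate (l.map (fun p => |pos - p|)) s).filter (fun id => id.2 == m)).map (·.1)
    = ((PySem.List.enumerate l s).filter (fun ip => |pos - ip.2| == m)).map (·.1) := by
  induction l with
  | nil => intro s; simp [PySem.List.enumerate]
  | cons p t ih =>
    intro s
    rw [List.map_cons, PySem.List.enumerate_cons, PySem.List.enumerate_cons]
    simp only [List.filter_cons]
    by_cases h : (|pos - p| == m) = true
    · simp only [h, if_true, List.map_cons, ih (s+1)]
    · simp only [eq_false_of_ne_true h, Bool.false_eq_true, if_false]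
      exact ih (s+1)

-- ===== VERDICT =====
theorem closest_indices_within_threshold_spec : Claim_equal_closest_indices_within_threshold := by
  intro pos positions threshold _
  unfold Spec_closest_indices_within_threshold
  cases positions with
  | nil => rfl
  | cons p t =>
    have hmin : PySem.List.min? ((p :: t).map (fun q => |pos - q|)) (fun x => x)
        = some (pvMinF pos (|pos - p|) t) := by
      rw [List.map_cons, PySem.List.min?_id_cons]
      congr 1
      simp [pvMinF, List.foldl_map]
    have hB : (PySem.List.enumerate (p :: t) 0).foldl (pvBStep pos) (none, []) =
        (some (pvMinF pos (|pos - p|) t),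
         (if ∃ q ∈ t, |pos - q| < |pos - p| then [] else [0]) ++
           ((PySem.List.enumerate t 1).filter
             (fun ip => |pos - ip.2| == pvMinF pos (|pos - p|) t)).map (·.1)) := by
      rw [PySem.List.enumerate_cons, List.foldl_cons]
      have hstep0 : pvBStep pos (none, []) ((0 : Int), p) = (some |pos - p|, [0]) := by
        simp [pvBStep]
      rw [hstep0]
      exact pvB_inv pos t 1 (|pos - p|) [0]
    simp only [closest_indices_within_threshold, closest_indices_within_threshold_alt,
      hmin, hB, if_neg (List.cons_ne_nil p t)]
    set b := |pos - p| with hb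
    set m := pvMinF pos b t with hm
    by_cases hth : m > threshold
    · rw [if_pos hth, if_pos hth]
    · rw [if_neg hth, if_neg hth]
      rw [pvEnumMapFilter pos m (p :: t) 0]
      rw [PySem.List.enumerate_cons]
      simp only [List.filter_cons]
      by_cases h3 : ∃ q ∈ t, |pos - q| < b
      · obtain ⟨q, hq, hlt⟩ := h3
        have hmb : m < b := pvMinF_lt_of_mem_lt pos b t q hq hlt
        have hne : (|pos - p| == m) = false := by
          simp only [beq_eq_false_iff_ne, ne_eq, ← hb]
          omega
        rw [hne, if_pos (show ∃ q ∈ t, |pos - q| < b from ⟨q, hq, hlt⟩)]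
        norm_num
      · have heq : m = b := by
          rw [hm]
          apply pvMinF_eq_of_all_ge
          intro q hq
          by_contra hc
          exact h3 ⟨q, hq, by omega⟩
        have hpe : (|pos - p| == m) = true := by rw [← hb, heq]; exact beq_self_eq_true b
        rw [hpe, if_neg h3]
        norm_num
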